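-- pv_equiv track=rewrite | github.com/steveyoung-random/cassiel-legal-workbench | utils/text_processing.py | deduplicate_breakpoints
-- ===== SOURCE A (Python) =====
-- def deduplicate_breakpoints(breakpoints):
--     """
--     Remove duplicate breakpoint locations, keeping only the breakpoint with
--     the lowest priority level for each location.
--
--     Each breakpoint is a list of [location, priority] where lower priority
--     numbers take precedence. Returns a new list of breakpoints with no
--     duplicate locations, sorted by location.
--
--     Args:
--         breakpoints: List of [location, priority] pairs
--
--     Returns:
--         list: Deduplicated list of breakpoints sorted by location
--     """
--     if not breakpoints:
--         return []
--
--     # Create a dictionary to track the minimum priority for each location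
--     location_priority = {}
--     for brk_entry in breakpoints:
--         location = brk_entry[0]
--         priority = brk_entry[1]
--         if location not in location_priority or priority < location_priority[location]:
--             location_priority[location] = priority
--
--     # Build the result list from the dictionary, sorted by location
--     result = [[location, priority] for location, priority in sorted(location_priority.items())]
--
--     return result
-- ===== SOURCE B (Python) =====
-- def deduplicate_breakpoints(breakpoints):
--     """Sort-then-dedup: sort by (location, priority) so the minimal priority
--     comes first in each location group, then keep the first entry per location."""
--     if not breakpoints:
--         return []
--     result = []
--     last = None
--     for entry in sorted(breakpoints, key=lambda e: (e[0], e[1])):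
--         if last is None or entry[0] != last:
--             result.append([entry[0], entry[1]])
--             last = entry[0]
--     return result
-- ===== Notes on version B (the rewrite author's own statement) =====
-- stated objective: alternative
-- what changed: Replaces the dict-of-minimum-priority followed by sorting the items with a single sort of the breakpoint list keyed on (location, priority) followed by one adjacent-dedup pass that keeps the first (minimal-priority) entry of each location group.
import Mathlib
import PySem

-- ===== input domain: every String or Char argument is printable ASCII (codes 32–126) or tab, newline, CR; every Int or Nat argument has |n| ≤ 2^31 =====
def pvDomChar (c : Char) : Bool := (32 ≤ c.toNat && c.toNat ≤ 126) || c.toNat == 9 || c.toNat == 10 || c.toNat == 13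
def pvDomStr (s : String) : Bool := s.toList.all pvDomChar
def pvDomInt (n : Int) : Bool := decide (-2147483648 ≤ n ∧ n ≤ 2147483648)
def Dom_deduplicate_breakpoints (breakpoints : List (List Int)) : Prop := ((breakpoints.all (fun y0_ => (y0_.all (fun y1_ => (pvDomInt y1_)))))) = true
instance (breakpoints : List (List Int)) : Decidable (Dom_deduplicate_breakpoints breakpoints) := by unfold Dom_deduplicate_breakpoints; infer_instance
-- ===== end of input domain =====

-- B replaces A's dict-of-minimum-priority + sort-of-items with one sort keyed on
-- (location, priority) followed by an adjacent-dedup pass (alternative algorithm,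
-- same asymptotic cost); return values proved equal on entries of length ≥ 2.

-- ===== PORT A =====
-- e[0] / e[1]; Pre_ guarantees the index is in range, so the .getD 0 default is never taken
def pvLoc (e : List Int) : Int := (PySem.List.pyGet? e 0).getD 0
def pvPr (e : List Int) : Int := (PySem.List.pyGet? e 1).getD 0

-- loop body of A: keep the smaller priority for each location (first branch = the Python `if`)
def stepA (d : PySem.Dict Int Int) (e : List Int) : PySem.Dict Int Int :=
  if !(d.contains (pvLoc e)) || decide (pvPr e < d.getD (pvLoc e) 0) then
    d.insert (pvLoc e) (pvPr e)
  else d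

def deduplicate_breakpoints (breakpoints : List (List Int)) : List (List Int) :=
  if breakpoints = [] then []
  else
    let location_priority : PySem.Dict Int Int := breakpoints.foldl stepA PySem.Dict.empty
    (PySem.List.sorted2 location_priority.items (fun q => q.1) (fun q => q.2)).map
      (fun q => [q.1, q.2])

-- ===== PORT B =====
-- loop body of B: state = (result, last emitted location)
def stepB (st : List (List Int) × Option Int) (e : List Int) : List (List Int) × Option Int :=
  if st.2 = none ∨ st.2 ≠ some (pvLoc e) then
    (st.1 ++ [[pvLoc e, pvPr e]], some (pvLoc e))
  else st

def deduplicate_breakpoints_alt (breakpoints : List (List Int)) : List (List Int) :=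
  if breakpoints = [] then []
  else
    ((PySem.List.sorted2 breakpoints (fun e => pvLoc e) (fun e => pvPr e)).foldl
      stepB ([], none)).1

-- ===== PRECONDITION & SPEC =====
-- Pre_ excludes exactly the inputs on which the Python A raises IndexError:
-- some entry has fewer than two elements (B raises there as well).
def Pre_deduplicate_breakpoints (breakpoints : List (List Int)) : Prop :=
  ∀ e ∈ breakpoints, 2 ≤ e.length
instance (breakpoints : List (List Int)) : Decidable (Pre_deduplicate_breakpoints breakpoints) := by
  unfold Pre_deduplicate_breakpoints; infer_instance
def pvWitness_deduplicate_breakpoints : List (List Int) := [[1, 2], [1, 1], [3, 0], [-2, 5, 7]]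
def Spec_deduplicate_breakpoints (breakpoints : List (List Int)) (out : List (List Int)) : Prop :=
  out = deduplicate_breakpoints_alt breakpoints
instance (breakpoints : List (List Int)) (out : List (List Int)) : Decidable (Spec_deduplicate_breakpoints breakpoints out) := by
  unfold Spec_deduplicate_breakpoints; infer_instance

-- ===== CLAIM (what is proved, stated in full; the proofs are below) =====
def Claim_equal_deduplicate_breakpoints : Prop := ∀ (breakpoints : List (List Int)), Dom_deduplicate_breakpoints breakpoints → Pre_deduplicate_breakpoints breakpoints → Spec_deduplicate_breakpoints breakpoints (deduplicate_breakpoints breakpoints)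

-- ===== LEMMAS AND PROOFS =====

-- B is in bounds (|loc|,|pr| ≤ 2^31, from Dom_) for every entry the proofs meet
def pvBnd (e : List Int) : Prop :=
  (-2147483648 ≤ pvLoc e ∧ pvLoc e ≤ 2147483648) ∧ (-2147483648 ≤ pvPr e ∧ pvPr e ≤ 2147483648)

-- the priorities recorded in breakpoints s for location l, in order
def prios (l : Int) (s : List (List Int)) : List Int :=
  (s.filter (fun e => pvLoc e == l)).map pvPr

-- running minimum (none = no value yet); mirrors A's `<`-update
def mstep (o : Option Int) (p : Int) : Option Int :=
  some (match o with | none => p | some v => if p < v then p else v)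
def mfold (o : Option Int) (ps : List Int) : Option Int := ps.foldl mstep o

def valS (l : Int) (s : List (List Int)) : Int := (mfold none (prios l s)).getD 0

-- first entry per location of an (already le2-sorted) list, as (loc, prio) pairs
def canonP : List (List Int) → List (Int × Int)
  | [] => []
  | e :: t => (pvLoc e, pvPr e) :: canonP (t.filter (fun x => !(pvLoc x == pvLoc e)))
termination_by s => s.length
decreasing_by
  simp only [List.length_cons, List.length_unattach]
  exact Nat.lt_succ_of_le (le_trans (List.length_filter_le _ _) (by simp))

-- the lexicographic ≤ the sort establishes
def le2 (a b : List Int) : Prop :=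
  pvLoc a < pvLoc b ∨ (pvLoc a = pvLoc b ∧ pvPr a ≤ pvPr b)

-- ----- generic: sorted2 with both keys bounded is sorted on the combined scalar key -----

lemma insertBy_congr {α : Type} (b b' : α → α → Bool) (x : α) (ys : List α)
    (h : ∀ y ∈ ys, b x y = b' x y) :
    PySem.List.insertBy b x ys = PySem.List.insertBy b' x ys := by
  induction ys with
  | nil => rfl
  | cons y ys ih =>
      simp only [PySem.List.insertBy]
      rw [h y (by simp)]
      by_cases hb : b' x y
      · simp [hb]
      · simp only [hb]
        rw [ih (fun z hz => h z (by simp [hz]))]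

lemma foldl_insertBy_congr {α : Type} (P : α → Prop) (b b' : α → α → Bool)
    (h : ∀ x y, P x → P y → b x y = b' x y) :
    ∀ (xs acc : List α), (∀ x ∈ xs, P x) → (∀ y ∈ acc, P y) →
      List.foldl (fun acc x => PySem.List.insertBy b x acc) acc xs
        = List.foldl (fun acc x => PySem.List.insertBy b' x acc) acc xs := by
  intro xs
  induction xs with
  | nil => intro acc _ _; rfl
  | cons x xs ih =>
      intro acc hxs hacc
      simp only [List.foldl_cons]
      rw [insertBy_congr b b' x acc (fun y hy => h x y (hxs x (by simp)) (hacc y hy))]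
      exact ih _ (fun z hz => hxs z (by simp [hz]))
        (fun y hy => ((PySem.List.mem_insertBy b' x y acc).1 hy).elim
          (fun hyx => hyx ▸ hxs x (by simp)) (hacc y))

lemma sorted2_enc {α : Type} (f g : α → Int) (xs : List α)
    (hb : ∀ e ∈ xs, (-2147483648 ≤ f e ∧ f e ≤ 2147483648) ∧
                    (-2147483648 ≤ g e ∧ g e ≤ 2147483648)) :
    PySem.List.sorted2 xs f g
      = PySem.List.sorted xs (fun e => f e * 8589934592 + g e) := by
  rw [PySem.List.sorted_eq_foldl_insertBy]
  simp only [PySem.List.sorted2, if_neg (by decide : ¬ (false = true))]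
  apply foldl_insertBy_congr
      (fun e => (-2147483648 ≤ f e ∧ f e ≤ 2147483648) ∧
                (-2147483648 ≤ g e ∧ g e ≤ 2147483648)) _ _ ?_ xs [] hb (by simp)
  intro x y hx hy
  by_cases h1 : f x < f y <;> by_cases h2 : f y < f x <;>
    simp [h1, h2] <;> omega

-- ----- A's dict loop -----

lemma prios_cons_self (e : List Int) (t : List (List Int)) :
    prios (pvLoc e) (e :: t) = pvPr e :: prios (pvLoc e) t := by
  simp [prios]

lemma prios_cons_ne (e : List Int) (t : List (List Int)) (l : Int) (h : l ≠ pvLoc e) :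
    prios l (e :: t) = prios l t := by
  unfold prios
  rw [List.filter_cons]
  have hb : (pvLoc e == l) = false := by simp; omega
  simp [hb]

lemma dict_fold_get? :
    ∀ (bps : List (List Int)) (d : PySem.Dict Int Int) (l : Int),
      (bps.foldl stepA d).get? l = mfold (d.get? l) (prios l bps) := by
  intro bps
  induction bps with
  | nil => intro d l; rfl
  | cons e t ih =>
      intro d l
      simp only [List.foldl_cons]
      rw [ih]
      by_cases hl : pvLoc e = l
      · subst hl
        have hpr : prios (pvLoc e) (e :: t) = pvPr e :: prios (pvLoc e) t :=
          prios_cons_self e t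
        rw [hpr]
        show mfold ((stepA d e).get? (pvLoc e)) _ = mfold (mstep (d.get? (pvLoc e)) (pvPr e)) _
        congr 1
        unfold stepA
        cases hc : d.get? (pvLoc e) with
        | none =>
            have : d.contains (pvLoc e) = false := by
              rw [PySem.Dict.contains_eq_isSome_get?, hc]; rfl
            simp [this, PySem.Dict.get?_insert_self, mstep]
        | some v =>
            have hcon : d.contains (pvLoc e) = true := by
              rw [PySem.Dict.contains_eq_isSome_get?, hc]; rfl
            have hg : d.getD (pvLoc e) 0 = v := PySem.Dict.getD_of_get?_eq_some d 0 hc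
            simp only [hcon, Bool.not_true, Bool.false_or, hg, mstep]
            by_cases hlt : pvPr e < v
            · simp [hlt, PySem.Dict.get?_insert_self]
            · simp [hlt, hc]
      · have hpr : prios l (e :: t) = prios l t :=
          prios_cons_ne e t l (fun h => hl h.symm)
        rw [hpr]
        congr 1
        unfold stepA
        split
        · exact PySem.Dict.get?_insert_of_ne d _ (fun h => hl h.symm)
        · rfl

lemma dict_fold_keys :
    ∀ (bps : List (List Int)) (d : PySem.Dict Int Int),
      (bps.foldl stepA d).keys = PySem.Set.update d.keys (bps.map pvLoc) := by
  intro bps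
  induction bps with
  | nil => intro d; rfl
  | cons e t ih =>
      intro d
      simp only [List.foldl_cons, List.map_cons, PySem.Set.update_cons]
      rw [ih]
      congr 1
      unfold stepA
      by_cases hc : d.contains (pvLoc e) = true
      · have hmem : pvLoc e ∈ d.keys := (PySem.Dict.contains_iff_mem_keys d _).1 hc
        rw [PySem.Set.add_of_mem hmem]
        split
        · exact PySem.Dict.keys_insert_of_contains d _ hc
        · rfl
      · have hc' : d.contains (pvLoc e) = false := by simpa using hc
        have hnm : pvLoc e ∉ d.keys := fun h =>
          hc ((PySem.Dict.contains_iff_mem_keys d _).2 h)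
        rw [PySem.Set.add_of_not_mem hnm]
        simp only [hc', Bool.not_false, Bool.true_or, if_pos]
        exact PySem.Dict.keys_insert_of_not_contains d _ hc'

-- ----- mfold facts -----

lemma mfold_perm {ps qs : List Int} (h : ps.Perm qs) (o : Option Int) :
    mfold o ps = mfold o qs := by
  induction h generalizing o with
  | nil => rfl
  | cons x _ ih => simp only [mfold, List.foldl_cons]; exact ih _
  | swap x y l =>
      simp only [mfold, List.foldl_cons]
      congr 1
      cases o <;> simp only [mstep] <;> split_ifs <;> simp <;> omega
  | trans _ _ ih1 ih2 => rw [ih1, ih2]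

lemma mfold_const (v : Int) (ps : List Int) (h : ∀ p ∈ ps, v ≤ p) :
    mfold (some v) ps = some v := by
  induction ps with
  | nil => rfl
  | cons p ps ih =>
      simp only [mfold, List.foldl_cons, mstep]
      have : ¬ p < v := not_lt.2 (h p (by simp))
      simp only [this, if_false]
      exact ih (fun q hq => h q (by simp [hq]))

lemma mfold_mem : ∀ (ps : List Int) (w v : Int),
    mfold (some w) ps = some v → v = w ∨ v ∈ ps := by
  intro ps
  induction ps with
  | nil => intro w v h; left; simpa [mfold] using h.symm
  | cons p ps ih =>
      intro w v h
      simp only [mfold, List.foldl_cons, mstep] at h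
      rcases ih _ _ h with h' | h'
      · by_cases hlt : p < w
        · simp [hlt] at h'; right; simp [h']
        · simp [hlt] at h'; left; exact h'
      · right; simp [h']

lemma mfold_none_mem (ps : List Int) (v : Int) (h : mfold none ps = some v) : v ∈ ps := by
  cases ps with
  | nil => simp [mfold] at h
  | cons p ps =>
      simp only [mfold, List.foldl_cons, mstep] at h
      rcases mfold_mem ps p v h with h' | h' <;> simp [h']

-- ----- facts about prios / valS -----

lemma prios_filter_ne (t : List (List Int)) (l l0 : Int) (h : l ≠ l0) :
    prios l (t.filter (fun x => !(pvLoc x == l0))) = prios l t := by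
  unfold prios
  rw [List.filter_filter]
  congr 1
  apply List.filter_congr
  intro x _
  by_cases hx : pvLoc x = l
  · simp [hx]
    omega
  · simp [hx]

lemma mem_prios (l : Int) (s : List (List Int)) (p : Int) :
    p ∈ prios l s ↔ ∃ x ∈ s, pvLoc x = l ∧ pvPr x = p := by
  simp only [prios, List.mem_map, List.mem_filter]
  constructor
  · rintro ⟨x, ⟨hx, hl⟩, hp⟩; exact ⟨x, hx, by simpa using hl, hp⟩
  · rintro ⟨x, hx, hl, hp⟩; exact ⟨x, ⟨hx, by simpa using hl⟩, hp⟩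

lemma valS_perm (l : Int) {s t : List (List Int)} (h : s.Perm t) : valS l s = valS l t := by
  unfold valS prios
  rw [mfold_perm ((h.filter _).map pvPr)]

-- ----- canonP characterisation -----

lemma pairwise_filter_of_pairwise {s : List (List Int)} (p : List Int → Bool)
    (h : List.Pairwise le2 s) : List.Pairwise le2 (s.filter p) :=
  List.Pairwise.sublist List.filter_sublist h

lemma canonP_cons (e : List Int) (t : List (List Int)) :
    canonP (e :: t) = (pvLoc e, pvPr e) :: canonP (t.filter (fun x => !(pvLoc x == pvLoc e))) := by
  rw [canonP]

lemma canonP_mem_aux : ∀ (n : Nat) (s : List (List Int)), s.length ≤ n → List.Pairwise le2 s →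
    ∀ p : Int × Int, p ∈ canonP s ↔ p.1 ∈ s.map pvLoc ∧ p.2 = valS p.1 s := by
  intro n
  induction n with
  | zero =>
      intro s hlen _ p
      rw [List.length_eq_zero_iff.1 (Nat.le_zero.1 hlen)]
      simp [canonP]
  | succ n ih =>
      intro s hlen hpw p
      cases s with
      | nil => simp [canonP]
      | cons e t =>
        have hpw' : List.Pairwise le2 (t.filter (fun x => !(pvLoc x == pvLoc e))) :=
          pairwise_filter_of_pairwise _ (List.pairwise_cons.1 hpw).2
        have hlen' : (t.filter (fun x => !(pvLoc x == pvLoc e))).length ≤ n := by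
          have := List.length_filter_le (fun x => !(pvLoc x == pvLoc e)) t
          simp at hlen; omega
        have hhead := (List.pairwise_cons.1 hpw).1
        rw [canonP_cons]
        by_cases hp1 : p.1 = pvLoc e
        · have hv : valS (pvLoc e) (e :: t) = pvPr e := by
            unfold valS
            rw [prios_cons_self]
            show (mfold (mstep none (pvPr e)) _).getD 0 = _
            have hms : mstep none (pvPr e) = some (pvPr e) := rfl
            rw [hms, mfold_const _ _ ?_]
            · rfl
            · intro q hq
              rcases (mem_prios _ _ _).1 hq with ⟨x, hx, hl, hpr⟩
              rcases hhead x hx with h' | h' <;> omega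
          constructor
          · intro hmem
            rcases List.mem_cons.1 hmem with h' | h'
            · refine ⟨by simp [hp1], ?_⟩
              rw [hp1, hv, h']
            · exfalso
              rcases List.mem_map.1 ((ih _ hlen' hpw' p).1 h').1 with ⟨x, hx, hl⟩
              have := (List.mem_filter.1 hx).2
              rw [hl, hp1] at this; simp at this
          · rintro ⟨_, hval⟩
            rw [hp1, hv] at hval
            have hpp : p = (pvLoc e, pvPr e) := by
              have h0 : p = (p.1, p.2) := rfl
              rw [h0, hp1, hval]
            simp [hpp]
        · have hv2 : valS p.1 (e :: t) = valS p.1 (t.filter (fun x => !(pvLoc x == pvLoc e))) := by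
            unfold valS
            rw [prios_filter_ne _ _ _ hp1, prios_cons_ne e t p.1 hp1]
          constructor
          · intro hmem
            rcases List.mem_cons.1 hmem with h' | h'
            · exact absurd (by rw [h']) hp1
            · rcases (ih _ hlen' hpw' p).1 h' with ⟨hmem', hval⟩
              rcases List.mem_map.1 hmem' with ⟨x, hx, hl⟩
              refine ⟨?_, by rw [hval, ← hv2]⟩
              simp only [List.map_cons, List.mem_cons]
              right
              exact List.mem_map.2 ⟨x, (List.mem_filter.1 hx).1, hl⟩
          · rintro ⟨hmem, hval⟩
            right
            apply (ih _ hlen' hpw' p).2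
            refine ⟨?_, by rw [hval, hv2]⟩
            rcases List.mem_map.1 hmem with ⟨x, hx, hl⟩
            rcases List.mem_cons.1 hx with h' | h'
            · exact absurd (by rw [← hl, h']) hp1
            · refine List.mem_map.2 ⟨x, List.mem_filter.2 ⟨h', ?_⟩, hl⟩
              have hne : pvLoc x ≠ pvLoc e := by rw [hl]; exact hp1
              simpa using hne

lemma canonP_mem (s : List (List Int)) (hpw : List.Pairwise le2 s) (p : Int × Int) :
    p ∈ canonP s ↔ p.1 ∈ s.map pvLoc ∧ p.2 = valS p.1 s :=
  canonP_mem_aux s.length s le_rfl hpw p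

lemma canonP_pairwise_aux : ∀ (n : Nat) (s : List (List Int)), s.length ≤ n →
    List.Pairwise le2 s →
    List.Pairwise (fun a b : Int × Int => a.1 < b.1) (canonP s) := by
  intro n
  induction n with
  | zero =>
      intro s hlen _
      rw [List.length_eq_zero_iff.1 (Nat.le_zero.1 hlen)]
      simp [canonP]
  | succ n ih =>
      intro s hlen hpw
      cases s with
      | nil => simp [canonP]
      | cons e t =>
        have hpw' : List.Pairwise le2 (t.filter (fun x => !(pvLoc x == pvLoc e))) :=
          pairwise_filter_of_pairwise _ (List.pairwise_cons.1 hpw).2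
        have hlen' : (t.filter (fun x => !(pvLoc x == pvLoc e))).length ≤ n := by
          have := List.length_filter_le (fun x => !(pvLoc x == pvLoc e)) t
          simp at hlen; omega
        have hhead := (List.pairwise_cons.1 hpw).1
        rw [canonP_cons]
        apply List.pairwise_cons.2
        refine ⟨?_, ih _ hlen' hpw'⟩
        intro q hq
        rcases List.mem_map.1 ((canonP_mem_aux n _ hlen' hpw' q).1 hq).1 with ⟨x, hx, hl⟩
        rcases List.mem_filter.1 hx with ⟨hxt, hne⟩
        have hne' : pvLoc x ≠ pvLoc e := by simpa using hne
        rcases hhead x hxt with h' | h' <;> omega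

lemma canonP_pairwise (s : List (List Int)) (hpw : List.Pairwise le2 s) :
    List.Pairwise (fun a b : Int × Int => a.1 < b.1) (canonP s) :=
  canonP_pairwise_aux s.length s le_rfl hpw

-- ----- B's fold -----

lemma stepB_fst_append : ∀ (s : List (List Int)) (res : List (List Int)) (lo : Option Int),
    (s.foldl stepB (res, lo)).1 = res ++ (s.foldl stepB ([], lo)).1 := by
  intro s
  induction s with
  | nil => simp
  | cons e t ih =>
      intro res lo
      simp only [List.foldl_cons]
      by_cases hc : lo = none ∨ lo ≠ some (pvLoc e)
      · rw [show stepB (res, lo) e = (res ++ [[pvLoc e, pvPr e]], some (pvLoc e)) from by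
              unfold stepB; rw [if_pos hc],
            show stepB ([], lo) e = ([] ++ [[pvLoc e, pvPr e]], some (pvLoc e)) from by
              unfold stepB; rw [if_pos hc]]
        rw [ih, ih ([] ++ [[pvLoc e, pvPr e]])]
        simp
      · rw [show stepB (res, lo) e = (res, lo) from by unfold stepB; rw [if_neg hc],
            show stepB ([], lo) e = ([], lo) from by unfold stepB; rw [if_neg hc]]
        exact ih res lo

lemma foldB_some : ∀ (s : List (List Int)), List.Pairwise le2 s →
    ∀ l : Int, (∀ x ∈ s, l ≤ pvLoc x) →
    (s.foldl stepB ([], some l)).1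
      = (canonP (s.filter (fun x => !(pvLoc x == l)))).map (fun q => [q.1, q.2]) := by
  intro s
  induction s with
  | nil => intro _ l _; simp [canonP]
  | cons e t ih =>
      intro hpw l hle
      have hpw' := (List.pairwise_cons.1 hpw).2
      have hhead := (List.pairwise_cons.1 hpw).1
      simp only [List.foldl_cons]
      by_cases he : pvLoc e = l
      · have : stepB ([], some l) e = ([], some l) := by
          unfold stepB; simp [he]
        rw [this]
        rw [ih hpw' l (fun x hx => hle x (by simp [hx]))]
        congr 2
        simp [he]
      · have hlt : l < pvLoc e := lt_of_le_of_ne (hle e (by simp)) (fun h => he h.symm)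
        have hcond : (some l = none ∨ (some l : Option Int) ≠ some (pvLoc e)) := by
          right; simp; omega
        have hstepe : stepB ([], some l) e = ([[pvLoc e, pvPr e]], some (pvLoc e)) := by
          unfold stepB; rw [if_pos hcond]; simp
        rw [hstepe, stepB_fst_append]
        rw [ih hpw' (pvLoc e) (fun x hx => by rcases hhead x hx with h' | h' <;> omega)]
        have hfe : t.filter (fun x => !(pvLoc x == l)) = t := by
          apply List.filter_eq_self.2
          intro x hx
          have : l < pvLoc x := by rcases hhead x hx with h' | h' <;> omega
          simp; omega
        have hstep : (e :: t).filter (fun x => !(pvLoc x == l))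
            = e :: t := by
          rw [List.filter_cons, if_pos (by simp [he])]
          rw [hfe]
        rw [hstep, canonP]
        simp

lemma foldB_none (s : List (List Int)) (hpw : List.Pairwise le2 s) :
    (s.foldl stepB ([], none)).1 = (canonP s).map (fun q => [q.1, q.2]) := by
  cases s with
  | nil => simp [canonP]
  | cons e t =>
      have hpw' := (List.pairwise_cons.1 hpw).2
      have hhead := (List.pairwise_cons.1 hpw).1
      simp only [List.foldl_cons]
      have hstepe : stepB ([], none) e = ([[pvLoc e, pvPr e]], some (pvLoc e)) := by
        unfold stepB; simp
      rw [hstepe, stepB_fst_append]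
      rw [foldB_some t hpw' (pvLoc e) (fun x hx => by rcases hhead x hx with h' | h' <;> omega)]
      rw [canonP_cons]
      simp

-- ----- bounds from Dom_ and Pre_ -----

lemma bnd_of_dom_pre (bps : List (List Int))
    (hdom : Dom_deduplicate_breakpoints bps) (hpre : Pre_deduplicate_breakpoints bps) :
    ∀ e ∈ bps, pvBnd e := by
  intro e he
  have hlen := hpre e he
  unfold Dom_deduplicate_breakpoints at hdom
  rw [List.all_eq_true] at hdom
  have hall := hdom e he
  rw [List.all_eq_true] at hall
  match e, hlen with
  | a :: b :: t, _ =>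
      have ha := hall a (by simp)
      have hb := hall b (by simp)
      simp [pvDomInt] at ha hb
      have hla : pvLoc (a :: b :: t) = a := by
        norm_num [pvLoc, PySem.List.pyGet?, PySem.List.pyIdx?]
        rw [if_pos (by omega)]
        simp
      have hpb : pvPr (a :: b :: t) = b := by
        norm_num [pvPr, PySem.List.pyGet?, PySem.List.pyIdx?]
      exact ⟨by rw [hla]; exact ⟨ha.1, ha.2⟩, by rw [hpb]; exact ⟨hb.1, hb.2⟩⟩

lemma valS_bnd (l : Int) (s : List (List Int)) (hb : ∀ e ∈ s, pvBnd e) :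
    -2147483648 ≤ valS l s ∧ valS l s ≤ 2147483648 := by
  unfold valS
  cases hm : mfold none (prios l s) with
  | none => simp
  | some v =>
      have hv := mfold_none_mem _ _ hm
      rcases (mem_prios _ _ _).1 hv with ⟨x, hx, _, hpr⟩
      have := (hb x hx).2
      simp only [Option.getD_some]
      omega

-- ===== VERDICT =====
theorem deduplicate_breakpoints_spec : Claim_equal_deduplicate_breakpoints := by
  intro bps hdom hpre
  unfold Spec_deduplicate_breakpoints
  by_cases hnil : bps = []
  · subst hnil; rfl
  · have hbnd : ∀ e ∈ bps, pvBnd e := bnd_of_dom_pre bps hdom hpre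
    unfold deduplicate_breakpoints deduplicate_breakpoints_alt
    rw [if_neg hnil, if_neg hnil]
    dsimp only
    -- the sorted list B works on
    have hsB : PySem.List.sorted2 bps (fun e => pvLoc e) (fun e => pvPr e)
        = PySem.List.sorted bps (fun e => pvLoc e * 8589934592 + pvPr e) :=
      sorted2_enc _ _ bps (fun e he => ⟨(hbnd e he).1, (hbnd e he).2⟩)
    set s := PySem.List.sorted bps (fun e => pvLoc e * 8589934592 + pvPr e) with hs
    have hperm : s.Perm bps := PySem.List.sorted_perm bps _ false
    have hbnds : ∀ e ∈ s, pvBnd e := fun e he => hbnd e (hperm.mem_iff.1 he)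
    have hpw : List.Pairwise le2 s := by
      apply List.Pairwise.imp_of_mem ?_ (PySem.List.sorted_pairwise bps _)
      intro a b ha hb hle
      have hba := hbnds a ha
      have hbb := hbnds b hb
      unfold le2
      rcases hba with ⟨⟨h1, h2⟩, h3, h4⟩
      rcases hbb with ⟨⟨h5, h6⟩, h7, h8⟩
      omega
    -- characterise A's dictionary
    set dictA := bps.foldl stepA PySem.Dict.empty with hdA
    have hkeys : dictA.keys = PySem.Set.ofList (bps.map pvLoc) := by
      rw [hdA, dict_fold_keys, PySem.Dict.keys_empty, PySem.Set.update_nil_left]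
    have hknd : dictA.keys.Nodup := by rw [hkeys]; exact PySem.Set.nodup_ofList _
    have hgetD : ∀ l : Int, dictA.getD l 0 = valS l bps := by
      intro l
      rw [PySem.Dict.getD_eq_get?_getD, hdA, dict_fold_get?, PySem.Dict.get?_empty]
      rfl
    have hitems : dictA.items = dictA.keys.map (fun k => (k, dictA.getD k 0)) :=
      PySem.Dict.items_eq_map_keys dictA hknd 0
    -- membership of items
    have hmem_items : ∀ p : Int × Int,
        p ∈ dictA.items ↔ p.1 ∈ s.map pvLoc ∧ p.2 = valS p.1 s := by
      intro p
      rw [hitems]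
      constructor
      · intro hp
        rcases List.mem_map.1 hp with ⟨k, hk, hkp⟩
        rw [hkeys] at hk
        have hk' : k ∈ bps.map pvLoc := (PySem.Set.mem_ofList _ _).1 hk
        have hk'' : p.1 ∈ s.map pvLoc := by
          rcases List.mem_map.1 hk' with ⟨x, hx, hxl⟩
          exact List.mem_map.2 ⟨x, hperm.mem_iff.2 hx, by rw [hxl, ← hkp]⟩
        refine ⟨hk'', ?_⟩
        rw [← hkp]
        show dictA.getD k 0 = _
        rw [hgetD, valS_perm _ hperm.symm]
      · rintro ⟨hmem, hval⟩
        rcases List.mem_map.1 hmem with ⟨x, hx, hxl⟩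
        have hk : p.1 ∈ dictA.keys := by
          rw [hkeys]
          exact (PySem.Set.mem_ofList _ _).2
            (List.mem_map.2 ⟨x, hperm.mem_iff.1 hx, hxl⟩)
        apply List.mem_map.2
        refine ⟨p.1, hk, ?_⟩
        rw [hgetD, ← valS_perm p.1 hperm, ← hval]
    -- bounds for items entries and canonP entries
    have hmemloc_bnd : ∀ l : Int, l ∈ s.map pvLoc → -2147483648 ≤ l ∧ l ≤ 2147483648 := by
      intro l hl
      rcases List.mem_map.1 hl with ⟨x, hx, hxl⟩
      have := (hbnds x hx).1
      omega
    have hvalS_bnd : ∀ l : Int, -2147483648 ≤ valS l s ∧ valS l s ≤ 2147483648 :=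
      fun l => valS_bnd l s hbnds
    have hpair_bnd : ∀ p : Int × Int, p.1 ∈ s.map pvLoc → p.2 = valS p.1 s →
        (-2147483648 ≤ p.1 ∧ p.1 ≤ 2147483648) ∧ (-2147483648 ≤ p.2 ∧ p.2 ≤ 2147483648) := by
      intro p h1 h2
      exact ⟨hmemloc_bnd _ h1, by rw [h2]; exact hvalS_bnd _⟩
    -- A's sort of the items, on the scalar key
    have hsA : PySem.List.sorted2 dictA.items (fun q => q.1) (fun q => q.2)
        = PySem.List.sorted dictA.items (fun q => q.1 * 8589934592 + q.2) := by
      apply sorted2_enc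
      intro p hp
      rcases (hmem_items p).1 hp with ⟨h1, h2⟩
      exact hpair_bnd p h1 h2
    -- the sorted items are exactly canonP s
    have hnd_canon : (canonP s).Nodup :=
      (canonP_pairwise s hpw).imp (fun {a b} hlt => by intro h; rw [h] at hlt; omega)
    have hnd_items : dictA.items.Nodup := by
      have : dictA.items.map Prod.fst = dictA.keys := by
        rw [hitems, List.map_map,
          show (Prod.fst ∘ fun k => (k, dictA.getD k 0)) = id from funext fun k => rfl,
          List.map_id]
      exact List.Nodup.of_map Prod.fst (by rw [this]; exact hknd)
    have hpermAcanon : (canonP s).Perm dictA.items := by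
      rw [List.perm_ext_iff_of_nodup hnd_canon hnd_items]
      intro p
      rw [canonP_mem s hpw p, hmem_items p]
    have hpwlt : List.Pairwise (fun a b : Int × Int =>
        a.1 * 8589934592 + a.2 < b.1 * 8589934592 + b.2) (canonP s) := by
      apply List.Pairwise.imp_of_mem ?_ (canonP_pairwise s hpw)
      intro a b ha hb hlt
      rcases (canonP_mem s hpw a).1 ha with ⟨ha1, ha2⟩
      rcases (canonP_mem s hpw b).1 hb with ⟨hb1, hb2⟩
      rcases hpair_bnd a ha1 ha2 with ⟨⟨_, _⟩, _, _⟩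
      rcases hpair_bnd b hb1 hb2 with ⟨⟨_, _⟩, _, _⟩
      omega
    have hsorted_items : PySem.List.sorted dictA.items (fun q => q.1 * 8589934592 + q.2)
        = canonP s :=
      PySem.List.sorted_eq_of_perm_of_pairwise_lt _ _ _ hpermAcanon hpwlt
    -- put both sides together
    rw [hsA, hsorted_items, hsB, foldB_none s hpw]
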